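-- pv_equiv track=rewrite | github.com/inductivekickback/mileage | compile.py | _split_and_sort
-- ===== SOURCE A (Python) =====
-- SCHOOL_TYPE_INDX = 0
--
-- def _split_and_sort(addresses):
--     result = []
--     types = ('E', 'M', 'H', 'O')
--     for t in types:
--         l = [k for k, v in addresses.items() if v[SCHOOL_TYPE_INDX].upper() == t]
--         l.sort(key=lambda s: s.upper())
--         result.append(l)
--     return result
-- ===== SOURCE B (Python) =====
-- SCHOOL_TYPE_INDX = 0
--
-- def _split_and_sort(addresses):
--     # One grouping pass, then ordered emission -- instead of one scan per type.
--     groups = {}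
--     for k, v in addresses.items():
--         groups.setdefault(v[SCHOOL_TYPE_INDX].upper(), []).append(k)
--     return [sorted(groups.get(t, []), key=lambda s: s.upper())
--             for t in ('E', 'M', 'H', 'O')]
-- ===== Notes on version B (the rewrite author's own statement) =====
-- stated objective: alternative
-- what changed: B replaces A's four separate scans of the address dict (one filter pass per school type) with a single grouping pass that buckets keys by uppercased type into a dict, then emits the four buckets in E/M/H/O order, sorting each.
import Mathlib
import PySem

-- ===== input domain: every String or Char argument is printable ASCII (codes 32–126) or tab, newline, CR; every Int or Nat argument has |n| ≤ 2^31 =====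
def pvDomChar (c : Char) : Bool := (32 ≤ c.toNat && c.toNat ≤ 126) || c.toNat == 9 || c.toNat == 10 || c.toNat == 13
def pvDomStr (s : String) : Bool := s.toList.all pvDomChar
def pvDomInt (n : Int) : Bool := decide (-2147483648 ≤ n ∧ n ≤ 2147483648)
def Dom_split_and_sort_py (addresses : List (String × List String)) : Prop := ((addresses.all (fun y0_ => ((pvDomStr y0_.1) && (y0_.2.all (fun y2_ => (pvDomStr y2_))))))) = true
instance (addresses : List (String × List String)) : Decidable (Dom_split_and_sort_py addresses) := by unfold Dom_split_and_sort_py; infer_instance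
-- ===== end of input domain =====

-- B replaces A's four per-type scans with one grouping pass into a dict, then ordered emission (alternative; equivalence is about the return value).

-- ===== PORT A =====
-- school type of an address entry: v[SCHOOL_TYPE_INDX].upper() (Pre_ excludes empty v, where Python raises IndexError)
def pvTypeOf (kv : String × List String) : String :=
  PySem.Str.upper ((PySem.List.pyGet? kv.2 0).getD "")

def split_and_sort_py (addresses : List (String × List String)) : List (List String) :=
  (["E", "M", "H", "O"]).foldl (fun result t =>
    let l := (addresses.filter (fun kv => pvTypeOf kv == t)).map (fun kv => kv.1)
    result ++ [PySem.List.sorted l (fun s => PySem.Str.upper s) false]) []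

-- ===== PORT B =====
def split_and_sort_py_alt (addresses : List (String × List String)) : List (List String) :=
  let groups : PySem.Dict String (List String) :=
    addresses.foldl (fun d kv => d.modify (pvTypeOf kv) [] (fun l => l ++ [kv.1])) PySem.Dict.empty
  (["E", "M", "H", "O"]).map (fun t =>
    PySem.List.sorted (groups.getD t []) (fun s => PySem.Str.upper s) false)

-- ===== PRECONDITION & SPEC =====
-- Pre_ excludes addresses with an empty value list, where Python's v[0] raises IndexError (both A and B raise there).
def Pre_split_and_sort_py (addresses : List (String × List String)) : Prop :=
  ∀ kv ∈ addresses, kv.2 ≠ []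
instance (addresses : List (String × List String)) : Decidable (Pre_split_and_sort_py addresses) := by unfold Pre_split_and_sort_py; infer_instance
def pvWitness_split_and_sort_py : (List (String × List String)) := [("Oak St", ["E", "x"]), ("Main St", ["h"])]

def Spec_split_and_sort_py (addresses : List (String × List String)) (out : List (List String)) : Prop := out = split_and_sort_py_alt addresses
instance (addresses : List (String × List String)) (out : List (List String)) : Decidable (Spec_split_and_sort_py addresses out) := by unfold Spec_split_and_sort_py; infer_instance

-- ===== CLAIM (what is proved, stated in full; the proofs are below) =====
def Claim_equal_split_and_sort_py : Prop := ∀ (addresses : List (String × List String)), Dom_split_and_sort_py addresses → Pre_split_and_sort_py addresses → Spec_split_and_sort_py addresses (split_and_sort_py addresses)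

-- ===== LEMMAS AND PROOFS =====

-- the grouping dict's bucket for t is exactly A's filtered key list
theorem pv_group_eq (addresses : List (String × List String)) (t : String) :
    (addresses.foldl (fun d kv => d.modify (pvTypeOf kv) [] (fun l => l ++ [kv.1])) PySem.Dict.empty).getD t []
      = (addresses.filter (fun kv => pvTypeOf kv == t)).map (fun kv => kv.1) := by
  have h := PySem.Dict.getD_foldl_modify_append
    (l := addresses.map (fun kv => (pvTypeOf kv, kv.1))) (d := (PySem.Dict.empty : PySem.Dict String (List String))) (c := t)
  rw [List.foldl_map] at h
  simpa [List.filter_map, List.map_map, Function.comp_def] using h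

-- ===== VERDICT (by name: the statement is the Claim_ definition above) =====
theorem split_and_sort_py_spec : Claim_equal_split_and_sort_py := by
  intro addresses _ _
  unfold Spec_split_and_sort_py split_and_sort_py split_and_sort_py_alt
  simp only [List.foldl, List.map, pv_group_eq]
  rfl
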